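-- pv_equiv track=rewrite | github.com/bbttko/PicoRV-TangNano9K | tools/bin2hex.py | checksumit
-- ===== SOURCE A (Python) =====
-- def twos_comp(val, bits):
-- 	return((val ^ 2**bits-1) + 1)
--
-- def checksumit(bytecount, address, recordtype, data):
-- 	sum = 0
-- 	value = data
-- 	value += recordtype << (4*8)
-- 	value += address << (5*8)
-- 	value += bytecount << (7*8)
--
-- 	for i in range(8):
-- 		sum += (0xff & (value >> (8*i)))
-- 	sum = sum & 0xff
-- 	return f":{value:0{16}X}{twos_comp(sum, 8):0{2}X}"
-- ===== SOURCE B (Python) =====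
-- def twos_comp(val, bits):
--     return (val ^ 2**bits - 1) + 1
--
-- def checksumit(bytecount, address, recordtype, data):
--     # Checksum via the digit-sum identity S_256(m) = m - 255 * sum(m // 256**i for i >= 1):
--     # accumulate the successive quotients of the low 64 bits instead of extracting bytes.
--     value = data + (recordtype << 32) + (address << 40) + (bytecount << 56)
--     m = value & 0xFFFFFFFFFFFFFFFF
--     total = 0
--     q = m
--     while q:
--         q //= 256
--         total += q
--     checksum = (m - 255 * total) & 0xFF
--     return f":{value:016X}{twos_comp(checksum, 8):02X}"
-- ===== Notes on version B (the rewrite author's own statement) =====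
-- stated objective: alternative
-- what changed: The checksum is no longer computed by extracting the 8 bytes with shift/mask: B uses the digit-sum identity S_256(m) = m - 255*sum(m//256^i), accumulating the successive quotients of the 64-bit-masked value in a while loop and taking one subtraction at the end; field combining and formatting are unchanged.
import Mathlib
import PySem

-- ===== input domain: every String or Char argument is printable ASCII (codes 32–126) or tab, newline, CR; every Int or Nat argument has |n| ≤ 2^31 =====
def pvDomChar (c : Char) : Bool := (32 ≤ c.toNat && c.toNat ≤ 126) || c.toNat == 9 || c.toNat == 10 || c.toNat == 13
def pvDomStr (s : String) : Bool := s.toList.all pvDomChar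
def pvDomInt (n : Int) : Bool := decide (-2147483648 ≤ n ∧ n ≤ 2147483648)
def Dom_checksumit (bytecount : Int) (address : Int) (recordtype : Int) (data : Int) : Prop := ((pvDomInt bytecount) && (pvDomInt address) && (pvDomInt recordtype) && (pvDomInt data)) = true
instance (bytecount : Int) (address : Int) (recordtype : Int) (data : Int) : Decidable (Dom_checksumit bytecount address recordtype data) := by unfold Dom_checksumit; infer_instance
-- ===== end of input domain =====

-- B computes the checksum by the digit-sum identity (accumulating successive quotients of
-- the 64-bit-masked value) instead of extracting bytes with shift/mask (objective: alternative).

-- shared formatting helper: Python's f"{v:0{w}X}" (uppercase hex, zero-padded, sign in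
-- front), identical in both sources' f-strings.
def pyFmtHexUpper (v : Int) (w : Int) : List Char :=
  PySem.Chars.zfill
    ((if v < 0 then ['-'] else []) ++ (Nat.toDigits 16 v.natAbs).map PySem.Chars.upperChar) w

-- ===== PORT A =====
def twos_comp (val : Int) (bits : Nat) : Int :=
  PySem.Int.bxor val (2 ^ bits - 1) + 1

def checksumit (bytecount : Int) (address : Int) (recordtype : Int) (data : Int) : String :=
  let value : Int := data + (recordtype <<< (4 * 8 : Nat)) + (address <<< (5 * 8 : Nat))
      + (bytecount <<< (7 * 8 : Nat))
  let sum : Int :=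
    (List.range 8).foldl (fun (s : Int) (i : Nat) => s + PySem.Int.band 255 (value >>> (8 * i))) 0
  let sum : Int := PySem.Int.band sum 255
  String.ofList (':' :: pyFmtHexUpper value 16 ++ pyFmtHexUpper (twos_comp sum 8) 2)

-- ===== PORT B =====
-- Source B's 'while q: q //= 256; total += q' loop; the argument is taken as a Nat because
-- m = value & 0xFFFFFFFFFFFFFFFF is nonnegative, so Nat division is exact for Python's //.
def sumQuotients (q : Nat) : Int :=
  if h : q = 0 then 0
  else ((q / 256 : Nat) : Int) + sumQuotients (q / 256)
  decreasing_by exact Nat.div_lt_self (Nat.pos_of_ne_zero h) (by norm_num)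

def checksumit_alt (bytecount : Int) (address : Int) (recordtype : Int) (data : Int) : String :=
  let value : Int := data + (recordtype <<< (32 : Nat)) + (address <<< (40 : Nat))
      + (bytecount <<< (56 : Nat))
  let m : Int := PySem.Int.band value 0xFFFFFFFFFFFFFFFF
  let total : Int := sumQuotients m.toNat
  let checksum : Int := PySem.Int.band (m - 255 * total) 255
  String.ofList (':' :: pyFmtHexUpper value 16 ++ pyFmtHexUpper (twos_comp checksum 8) 2)

-- ===== PRECONDITION & SPEC =====
def Spec_checksumit (bytecount : Int) (address : Int) (recordtype : Int) (data : Int) (out : String) : Prop := out = checksumit_alt bytecount address recordtype data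
instance (bytecount : Int) (address : Int) (recordtype : Int) (data : Int) (out : String) : Decidable (Spec_checksumit bytecount address recordtype data out) := by unfold Spec_checksumit; infer_instance

-- ===== CLAIM (what is proved, stated in full; the proofs are below) =====
def Claim_equal_checksumit : Prop := ∀ (bytecount : Int) (address : Int) (recordtype : Int) (data : Int), Dom_checksumit bytecount address recordtype data → Spec_checksumit bytecount address recordtype data (checksumit bytecount address recordtype data)

-- ===== LEMMAS AND PROOFS =====

theorem band255 (v : Int) : PySem.Int.band 255 v = v % 256 := by
  unfold PySem.Int.band
  have e : (255 : Int).toNat = 2 ^ 8 - 1 := rfl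
  split_ifs with h1 h2 h2 <;>
    first
    | (simp only [e, Nat.and_comm (2 ^ 8 - 1), Nat.and_two_pow_sub_one_eq_mod _ 8]; omega)
    | omega

theorem bandMask64 (v : Int) :
    PySem.Int.band v 0xFFFFFFFFFFFFFFFF = v % 18446744073709551616 := by
  unfold PySem.Int.band
  have e : (18446744073709551615 : Int).toNat = 2 ^ 64 - 1 := rfl
  split_ifs with h1 h2 h2 <;>
    first
    | (simp only [e, Nat.and_comm (2 ^ 64 - 1), Nat.and_two_pow_sub_one_eq_mod _ 64]; omega)
    | omega

-- unfolding the quotient loop for a 64-bit value: eight quotient terms, then 0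
theorem sumQuotients_eq (m : Nat) (h : m < 18446744073709551616) :
    sumQuotients m = ((m / 256 + m / 65536 + m / 16777216 + m / 4294967296
      + m / 1099511627776 + m / 281474976710656 + m / 72057594037927936 : Nat) : Int) := by
  rw [sumQuotients, sumQuotients, sumQuotients, sumQuotients, sumQuotients, sumQuotients,
    sumQuotients, sumQuotients, sumQuotients]
  simp only [Nat.div_div_eq_div_mul]
  split_ifs <;> push_cast <;> omega

theorem sums_eq (v : Int) :
    PySem.Int.band
      ((List.range 8).foldl (fun (s : Int) (i : Nat) => s + PySem.Int.band 255 (v >>> (8 * i))) 0) 255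
    = PySem.Int.band
        (PySem.Int.band v 0xFFFFFFFFFFFFFFFF
          - 255 * sumQuotients (PySem.Int.band v 0xFFFFFFFFFFFFFFFF).toNat) 255 := by
  rw [PySem.Int.band_comm _ 255, PySem.Int.band_comm _ 255]
  have hnn : 0 ≤ v % 18446744073709551616 := Int.emod_nonneg v (by norm_num)
  have hub : v % 18446744073709551616 < 18446744073709551616 :=
    Int.emod_lt_of_pos v (by norm_num)
  rw [bandMask64]
  rw [sumQuotients_eq _ (by omega)]
  simp only [List.range, List.range.loop, List.foldl, band255, Int.shiftRight_eq_div_pow]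
  norm_num
  omega

-- ===== VERDICT (by name: the statement is the Claim_ definition above) =====
theorem checksumit_spec : Claim_equal_checksumit := by
  intro bytecount address recordtype data _
  unfold Spec_checksumit
  simp only [checksumit, checksumit_alt, sums_eq]
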